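-- pv_equiv track=rewrite | github.com/tahsinalamin/infinite_addmul | infinitearithmetic.py | recursive_addition
-- ===== SOURCE A (Python) =====
-- digitspernode=4
--
-- def recursive_addition(left_list,right_list,i,carry,final_result):
--     if i<0:
--         return final_result
--     else:
--         add_result=int(right_list[i])+int(left_list[i])+carry
--         addition_without_carry=int(add_result%(10**digitspernode))
--         carry=int(add_result/(10**digitspernode))
--         final_result.append(str(addition_without_carry))
--         return recursive_addition(left_list,right_list,i-1,carry,final_result)
-- ===== SOURCE B (Python) =====
-- digitspernode = 4
--
-- def recursive_addition(left_list, right_list, i, carry, final_result):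
--     # explicit countdown loop instead of tail recursion; same in-place append to final_result
--     for j in range(i, -1, -1):
--         add_result = int(right_list[j]) + int(left_list[j]) + carry
--         final_result.append(str(int(add_result % (10**digitspernode))))
--         carry = int(add_result / (10**digitspernode))
--     return final_result
-- ===== Notes on version B (the rewrite author's own statement) =====
-- stated objective: idiomatic
-- what changed: Replaced the tail recursion by an explicit for-loop counting j down from i to 0 with a running carry, appending into final_result as it goes (the float-division carry update is kept verbatim, so B matches A bit-for-bit on huge chunks too).
import Mathlib
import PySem

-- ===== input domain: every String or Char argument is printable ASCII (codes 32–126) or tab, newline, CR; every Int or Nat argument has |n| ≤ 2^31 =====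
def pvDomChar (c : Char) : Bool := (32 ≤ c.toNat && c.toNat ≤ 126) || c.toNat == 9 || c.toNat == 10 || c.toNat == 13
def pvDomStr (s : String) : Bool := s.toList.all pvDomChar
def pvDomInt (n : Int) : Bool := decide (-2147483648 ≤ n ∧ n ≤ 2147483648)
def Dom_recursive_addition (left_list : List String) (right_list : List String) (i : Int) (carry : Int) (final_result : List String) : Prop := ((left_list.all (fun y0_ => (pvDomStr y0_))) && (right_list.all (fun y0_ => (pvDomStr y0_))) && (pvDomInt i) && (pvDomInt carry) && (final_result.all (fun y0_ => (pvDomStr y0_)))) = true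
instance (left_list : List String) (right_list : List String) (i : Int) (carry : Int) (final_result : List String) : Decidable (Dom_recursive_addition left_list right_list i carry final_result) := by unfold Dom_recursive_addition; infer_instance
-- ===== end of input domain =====

-- Header: B replaces A's tail recursion by an explicit countdown loop (fold over range(i,-1,-1))
-- with a running carry, keeping A's float-division carry update verbatim; same return value, and
-- both Pythons mutate final_result in place identically. The equivalence proved here is about the
-- return value.


-- ===== PORT A =====
-- Hand-written exact model of Python's `int(a/10000)`: `a/10000` is the binary64 double nearest
-- to the rational a/10000 (round to nearest, ties to even), and `int` truncates it toward zero.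
-- This integer computation reproduces that double bit-for-bit whenever the quotient does not
-- overflow the double range (|a| far below 10^312), which Pre_ guarantees; no PySem primitive covers it.
def pyTruncFdiv10000 (a : Int) : Int :=
  if a = 0 then 0
  else
    let n := a.natAbs
    let size := Nat.log2 n + 1                 -- bit length of n (n ≠ 0)
    let c0 : Int := (size : Int) - 14          -- 10000 has 14 bits
    -- E = floor(log2 (n/10000)) : c0 or c0-1
    let ge : Bool := if 0 ≤ c0 then decide (10000 * 2 ^ c0.toNat ≤ n) else decide (10000 ≤ n * 2 ^ (-c0).toNat)
    let E := if ge then c0 else c0 - 1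
    let e := E - 52                            -- ulp exponent of the quotient
    let num := if 0 ≤ e then n else n * 2 ^ (-e).toNat
    let den := if 0 ≤ e then 10000 * 2 ^ e.toNat else 10000
    let q := num / den
    let r := num % den
    let m := if 2 * r > den ∨ (2 * r = den ∧ q % 2 = 1) then q + 1 else q   -- round to nearest, ties to even
    let v : Nat := if 0 ≤ e then m * 2 ^ e.toNat else m / 2 ^ (-e).toNat   -- truncate |double| toward zero
    if 0 < a then (v : Int) else -(v : Int)

def recursive_addition (left_list : List String) (right_list : List String) (i : Int) (carry : Int) (final_result : List String) : List String :=
  if i < 0 then final_result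
  else
    match PySem.List.pyGet? right_list i, PySem.List.pyGet? left_list i with
    | some rs, some ls =>
      match PySem.Int.ofStr? rs, PySem.Int.ofStr? ls with
      | some rv, some lv =>
        let add_result := rv + lv + carry
        let addition_without_carry := PySem.Int.mod add_result 10000
        let carry' := pyTruncFdiv10000 add_result
        recursive_addition left_list right_list (i-1) carry'
          (final_result ++ [PySem.Int.toStr addition_without_carry])
      | _, _ => final_result      -- ValueError: outside Pre_
    | _, _ => final_result        -- IndexError: outside Pre_
termination_by (i+1).toNat
decreasing_by omega

-- ===== PORT B =====
def recursive_addition_alt (left_list : List String) (right_list : List String) (i : Int) (carry : Int) (final_result : List String) : List String :=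
  ((PySem.List.pyRange i (-1) (-1)).foldl (fun st j =>
    match (PySem.List.pyGet? right_list j).bind PySem.Int.ofStr? with
    | none => st                  -- IndexError/ValueError: outside Pre_
    | some rv =>
      match (PySem.List.pyGet? left_list j).bind PySem.Int.ofStr? with
      | none => st                -- IndexError/ValueError: outside Pre_
      | some lv =>
        let add_result := rv + lv + st.1
        (pyTruncFdiv10000 add_result, st.2 ++ [PySem.Int.toStr (PySem.Int.mod add_result 10000)])
    ) (carry, final_result)).2

-- ===== PRECONDITION & SPEC =====
-- chunk parses as an int of magnitude ≤ 10^307 (far inside the double range, so A's float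
-- division never overflows anywhere in the carry chain)
def pvChunkOK (s : String) : Bool :=
  match PySem.Int.ofStr? s with
  | some v => decide (v.natAbs ≤ 10 ^ 307)
  | none => false

-- Pre_ excludes: i ≥ length of either list (A raises IndexError), a chunk at position ≤ i that
-- int() rejects (A raises ValueError), and chunks parsing beyond 10^307 in magnitude — a safety
-- margin below the region (around 1.8*10^312) where A's `int(add_result/10**4)` raises
-- OverflowError, whose exact boundary depends on the running carry and so has no closed form.
def Pre_recursive_addition (left_list : List String) (right_list : List String) (i : Int) (carry : Int) (final_result : List String) : Prop :=
  i < 0 ∨ (i < (left_list.length : Int) ∧ i < (right_list.length : Int) ∧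
    ((List.range (i.toNat+1)).all (fun j =>
      pvChunkOK (left_list.getD j "") && pvChunkOK (right_list.getD j ""))) = true)
instance (left_list : List String) (right_list : List String) (i : Int) (carry : Int) (final_result : List String) : Decidable (Pre_recursive_addition left_list right_list i carry final_result) := by unfold Pre_recursive_addition; infer_instance

def pvWitness_recursive_addition : List String × List String × Int × Int × List String :=
  (["12", "-9999"], ["3", "42"], 1, 0, [])

def Spec_recursive_addition (left_list : List String) (right_list : List String) (i : Int) (carry : Int) (final_result : List String) (out : List String) : Prop := out = recursive_addition_alt left_list right_list i carry final_result
instance (left_list : List String) (right_list : List String) (i : Int) (carry : Int) (final_result : List String) (out : List String) : Decidable (Spec_recursive_addition left_list right_list i carry final_result out) := by unfold Spec_recursive_addition; infer_instance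

-- ===== CLAIM (what is proved, stated in full; the proofs are below) =====
def Claim_equal_recursive_addition : Prop := ∀ (left_list : List String) (right_list : List String) (i : Int) (carry : Int) (final_result : List String), Dom_recursive_addition left_list right_list i carry final_result → Pre_recursive_addition left_list right_list i carry final_result → Spec_recursive_addition left_list right_list i carry final_result (recursive_addition left_list right_list i carry final_result)

-- ===== LEMMAS AND PROOFS =====

lemma recursive_addition_eq_alt : ∀ (n : Nat) (L R : List String) (i carry : Int) (fr : List String),
    (i+1).toNat = n →
    Pre_recursive_addition L R i carry fr →
    recursive_addition L R i carry fr = recursive_addition_alt L R i carry fr := by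
  intro n
  induction n with
  | zero =>
    intro L R i carry fr hn _
    have hi : i < 0 := by omega
    rw [recursive_addition, if_pos hi, recursive_addition_alt,
        PySem.List.pyRange_neg_one_eq_nil (by omega)]
    rfl
  | succ n ih =>
    intro L R i carry fr hn hpre
    by_cases hi : i < 0
    · rw [recursive_addition, if_pos hi, recursive_addition_alt,
          PySem.List.pyRange_neg_one_eq_nil (by omega)]
      rfl
    · rw [not_lt] at hi
      rcases hpre with h | ⟨hL, hR, hall⟩
      · omega
      have hmem : i.toNat ∈ List.range (i.toNat + 1) := by
        simp
      have hok := (List.all_eq_true.mp hall) _ hmem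
      have hokL : pvChunkOK (L.getD i.toNat "") = true := by
        simpa using (by simpa using hok : _ ∧ _).1
      have hokR : pvChunkOK (R.getD i.toNat "") = true := by
        simpa using (by simpa using hok : _ ∧ _).2
      have hLlen : i.toNat < L.length := by omega
      have hRlen : i.toNat < R.length := by omega
      have hgetL : L.getD i.toNat "" = L[i.toNat] := List.getD_eq_getElem L "" hLlen
      have hgetR : R.getD i.toNat "" = R[i.toNat] := List.getD_eq_getElem R "" hRlen
      rw [hgetL] at hokL
      rw [hgetR] at hokR
      obtain ⟨lv, hlv⟩ : ∃ v, PySem.Int.ofStr? L[i.toNat] = some v := by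
        unfold pvChunkOK at hokL
        rcases h : PySem.Int.ofStr? L[i.toNat] with _ | v
        · rw [h] at hokL; simp at hokL
        · exact ⟨v, rfl⟩
      obtain ⟨rv, hrv⟩ : ∃ v, PySem.Int.ofStr? R[i.toNat] = some v := by
        unfold pvChunkOK at hokR
        rcases h : PySem.Int.ofStr? R[i.toNat] with _ | v
        · rw [h] at hokR; simp at hokR
        · exact ⟨v, rfl⟩
      have hpgL : PySem.List.pyGet? L i = some L[i.toNat] :=
        PySem.List.pyGet?_eq_some_getElem (xs := L) hi hL
      have hpgR : PySem.List.pyGet? R i = some R[i.toNat] :=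
        PySem.List.pyGet?_eq_some_getElem (xs := R) hi hR
      rw [recursive_addition, if_neg (by omega)]
      rw [recursive_addition_alt, PySem.List.pyRange_neg_one_cons (by omega : (-1:Int) < i),
          List.foldl_cons]
      simp only [hpgL, hpgR, hlv, hrv, Option.bind_some]
      have halt : ∀ c' fr', ((PySem.List.pyRange (i-1) (-1) (-1)).foldl (fun st j =>
          match (PySem.List.pyGet? R j).bind PySem.Int.ofStr? with
          | none => st
          | some rv =>
            match (PySem.List.pyGet? L j).bind PySem.Int.ofStr? with
            | none => st
            | some lv =>
              let add_result := rv + lv + st.1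
              (pyTruncFdiv10000 add_result, st.2 ++ [PySem.Int.toStr (PySem.Int.mod add_result 10000)])) (c', fr')).2 = recursive_addition_alt L R (i-1) c' fr' := by
        intro c' fr'
        rw [recursive_addition_alt]
      rw [halt]
      apply ih
      · omega
      · by_cases hi0 : i - 1 < 0
        · exact Or.inl hi0
        · refine Or.inr ⟨by omega, by omega, ?_⟩
          rw [List.all_eq_true] at hall ⊢
          intro j hj
          exact hall j (by simp at hj ⊢; omega)

-- ===== VERDICT =====
theorem recursive_addition_spec : Claim_equal_recursive_addition := by
  intro L R i carry fr _ hpre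
  exact recursive_addition_eq_alt ((i+1).toNat) L R i carry fr rfl hpre
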